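-- pv_equiv track=rewrite | github.com/bm2-lab/X-MOL | FT_to_prediction/pt_link_emb.py | ring_emb_n
-- ===== SOURCE A (Python) =====
-- def split_smi_1(smi, rm_d=False):
--     """
--         split SMILES to tokens
--         function type 1
--         according to the character in SMILES, character within [] and two-digit number %** is regarded as one token
--         :param smi: SMILES to be splitted
--         :param rm_d: True when just extract tokens, the duplicate token will be removed, and False when coding the SMILES
--         :return: tokens of the SMILES
--     """
--     tokens = []
--     dc_a = ('l','r')
--     marker = 0 # 1,2 indicates that the last token is not complete
--     for c in smi:
--         if marker == 0:
--             if c in dc_a: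
--                 tokens[-1] += c
--             else:
--                 tokens.append(c)
--                 if c == '[':
--                     marker = 1
--                 elif c == '%':
--                     marker = 2
--                     marker_l = 2 #indicates that remain length of %**
--         else:
--             tokens[-1] += c
--             if marker == 1:
--                 if c == ']':
--                     marker = 0
--             elif marker == 2:
--                 marker_l -= 1
--                 if marker_l == 0:
--                     marker = 0
--     if rm_d:
--         tokens = list(set(tokens))
--
--     return tokens
--
-- def ring_emb_n(smi):
--     """
--     build ring embedding for SMILES
--     the return index points to the ring closing number
--     """
--     num_pool = ('1','2','3','4','5','6','7','8','9','%10','%11','%12','%13')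
--     pointers = {i:'*' for i in num_pool}
--     smis = split_smi_1(smi)
--     ring_emb_store = ['*' for _ in smis]
--     for idx,tk in enumerate(smis):
--         if tk in num_pool:
--             if pointers[tk] == '*':
--                 pointers[tk] = idx
--             elif pointers[tk] != '*':
--                 ring_emb_store[pointers[tk]] = str(idx)
--                 ring_emb_store[idx] = str(pointers[tk])
--                 pointers[tk] = '*'
--
--     return ring_emb_store
-- ===== SOURCE B (Python) =====
-- def split_smi_1(smi, rm_d=False):
--     """
--         split SMILES to tokens
--         function type 1
--         according to the character in SMILES, character within [] and two-digit number %** is regarded as one token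
--         :param smi: SMILES to be splitted
--         :param rm_d: True when just extract tokens, the duplicate token will be removed, and False when coding the SMILES
--         :return: tokens of the SMILES
--     """
--     # NOTE: this helper is kept VERBATIM from the original module (A uses the
--     # same one); in particular the two-character elements Cl/Br are merged via
--     # the ('l','r') tuple exactly as in A, and a SMILES starting with 'l' or
--     # 'r' raises the same IndexError here as in A.
--     tokens = []
--     dc_a = ('l','r')
--     marker = 0 # 1,2 indicates that the last token is not complete
--     for c in smi:
--         if marker == 0:
--             if c in dc_a:
--                 tokens[-1] += c
--             else:
--                 tokens.append(c)
--                 if c == '[':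
--                     marker = 1
--                 elif c == '%':
--                     marker = 2
--                     marker_l = 2 #indicates that remain length of %**
--         else:
--             tokens[-1] += c
--             if marker == 1:
--                 if c == ']':
--                     marker = 0
--             elif marker == 2:
--                 marker_l -= 1
--                 if marker_l == 0:
--                     marker = 0
--     if rm_d:
--         tokens = list(set(tokens))
--
--     return tokens
--
-- def ring_emb_n(smi):
--     """
--     build ring embedding for SMILES
--     the return index points to the ring closing number
--     index-then-pair decomposition: collect each token's occurrence indices,
--     then pair each ring number's indices two at a time.
--     """
--     num_pool = ('1','2','3','4','5','6','7','8','9','%10','%11','%12','%13')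
--     smis = split_smi_1(smi)
--     out = ['*'] * len(smis)
--     occ_map = {}
--     for i, tk in enumerate(smis):
--         occ_map.setdefault(tk, []).append(i)
--     for t in num_pool:
--         occ = occ_map.get(t, [])
--         while len(occ) >= 2:
--             a, b = occ[0], occ[1]
--             out[a] = str(b)
--             out[b] = str(a)
--             occ = occ[2:]
--     return out
-- ===== Notes on version B (the rewrite author's own statement) =====
-- stated objective: alternative
-- what changed: A's single stateful pass that toggles a per-ring-number pending-position pointer and writes each pair when the closing token arrives is replaced by an index-then-pair decomposition: one pass builds a dict from token to its list of occurrence indices, then for each ring number the index list is walked two at a time writing each index into the other's slot; an unpaired last occurrence keeps the placeholder. The split_smi_1 tokenizer is shared verbatim, so both raise the same IndexError on strings starting with 'l'/'r'.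
-- outside the precondition, e.g. on ring_emb_n('l'): A raises IndexError, B raises IndexError; on ring_emb_n('r'): A raises IndexError, B raises IndexError
import Mathlib
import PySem

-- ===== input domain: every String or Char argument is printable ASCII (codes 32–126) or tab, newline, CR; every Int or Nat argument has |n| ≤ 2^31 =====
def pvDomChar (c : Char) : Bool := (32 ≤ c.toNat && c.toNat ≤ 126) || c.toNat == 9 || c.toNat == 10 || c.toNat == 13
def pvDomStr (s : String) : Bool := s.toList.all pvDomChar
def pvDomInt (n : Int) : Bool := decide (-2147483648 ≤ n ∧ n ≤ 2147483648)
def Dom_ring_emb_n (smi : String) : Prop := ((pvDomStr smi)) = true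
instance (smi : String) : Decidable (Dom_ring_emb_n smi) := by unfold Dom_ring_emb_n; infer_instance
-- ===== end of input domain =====

-- B replaces A's pointer-toggling single pass by "collect every token's occurrence indices,
-- then pair each ring-number's indices two at a time" (objective: alternative decomposition, same cost).

-- ===== PORT A =====
-- shared helper: split_smi_1, used VERBATIM by both A and B (ring_emb_n only calls it with
-- rm_d=False, so the rm_d branch — list(set(tokens)) — is not ported).
-- Python raises IndexError when it appends a character to the last token of a still-empty
-- token list (first character l or r); those inputs are excluded by Pre_ below; the total
-- helper appends to the empty string there.
def pvAddLast (ts : List String) (c : Char) : List String :=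
  ts.dropLast ++ [(ts.getLastD "").push c]

def split_smi_1 (smi : String) : List String :=
  (smi.toList.foldl
    (fun (st : List String × Nat × Nat) c =>
      let (tokens, marker, marker_l) := st
      if marker = 0 then
        if c = 'l' ∨ c = 'r' then (pvAddLast tokens c, 0, marker_l)
        else
          let tokens := tokens ++ [String.singleton c]
          if c = '[' then (tokens, 1, marker_l)
          else if c = '%' then (tokens, 2, 2)
          else (tokens, 0, marker_l)
      else
        let tokens := pvAddLast tokens c
        if marker = 1 then (tokens, if c = ']' then 0 else 1, marker_l)
        else
          let marker_l := marker_l - 1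
          (tokens, if marker_l = 0 then 0 else 2, marker_l))
    ([], 0, 0)).1

def numPool : List String :=
  ["1","2","3","4","5","6","7","8","9","%10","%11","%12","%13"]

-- the body of A's 'for idx,tk in enumerate(smis)' loop; state = (pointers, ring_emb_store)
def stepA (st : PySem.Dict String (Option Int) × List String) (p : Int × String) :
    PySem.Dict String (Option Int) × List String :=
  if numPool.contains p.2 then
    match st.1.getD p.2 none with
    | none => (st.1.insert p.2 (some p.1), st.2)
    | some j =>
        (st.1.insert p.2 none,
          PySem.List.pySetD (PySem.List.pySetD st.2 j (PySem.Int.toStr p.1)) p.1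
            (PySem.Int.toStr j))
  else st

def ring_emb_n (smi : String) : List String :=
  let pointers : PySem.Dict String (Option Int) :=
    numPool.foldl (fun d t => d.insert t none) PySem.Dict.empty   -- {i:'*' for i in num_pool}
  let smis := split_smi_1 smi
  let store := smis.map (fun _ => "*")
  ((PySem.List.enumerate smis).foldl stepA (pointers, store)).2

-- ===== PORT B =====
-- B's while-loop over the occurrence list, consuming two indices per step
def pairWrite (out : List String) (occ : List Int) : List String :=
  match occ with
  | a :: b :: rest =>
      pairWrite
        (PySem.List.pySetD (PySem.List.pySetD out a (PySem.Int.toStr b)) b (PySem.Int.toStr a))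
        rest
  | _ => out

def ring_emb_n_alt (smi : String) : List String :=
  let smis := split_smi_1 smi
  let out := smis.map (fun _ => "*")
  let occ_map : PySem.Dict String (List Int) :=
    (PySem.List.enumerate smis).foldl
      (fun d p => d.modify p.2 [] (· ++ [p.1])) PySem.Dict.empty
  numPool.foldl (fun out t => pairWrite out (occ_map.getD t [])) out

-- ===== PRECONDITION & SPEC =====
-- Pre_ excludes EXACTLY the inputs on which Python A raises IndexError and returns no value:
-- strings whose first character is 'l' or 'r', where the shared split_smi_1 helper (verbatim
-- in both A and B) executes tokens[-1] on an empty list; B raises the identical IndexError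
-- there, so no input on which A returns a value is excluded.
def Pre_ring_emb_n (smi : String) : Prop :=
  smi.toList.head? ≠ some 'l' ∧ smi.toList.head? ≠ some 'r'
instance (smi : String) : Decidable (Pre_ring_emb_n smi) := by
  unfold Pre_ring_emb_n; infer_instance

def pvWitness_ring_emb_n : String := "C1CC1%10OC%10"

def Spec_ring_emb_n (smi : String) (out : List String) : Prop := out = ring_emb_n_alt smi
instance (smi : String) (out : List String) : Decidable (Spec_ring_emb_n smi out) := by
  unfold Spec_ring_emb_n; infer_instance

-- ===== CLAIM (what is proved, stated in full; the proofs are below) =====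
def Claim_equal_ring_emb_n : Prop :=
  ∀ (smi : String), Dom_ring_emb_n smi → Pre_ring_emb_n smi →
    Spec_ring_emb_n smi (ring_emb_n smi)

-- ===== LEMMAS AND PROOFS =====

-- occurrence indices of token t in l, counting from s
def occIdx (t : String) (s : Int) : List String → List Int
  | [] => []
  | x :: r => if x = t then s :: occIdx t (s + 1) r else occIdx t (s + 1) r

theorem occIdx_ne (t x : String) (s : Int) (r : List String) (h : x ≠ t) :
    occIdx t s (x :: r) = occIdx t (s + 1) r := by
  simp [occIdx, h]

theorem mem_occIdx_le (t : String) (s : Int) (l : List String) (m : Int)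
    (h : m ∈ occIdx t s l) : s ≤ m := by
  induction l generalizing s with
  | nil => simp [occIdx] at h
  | cons x r ih =>
      simp only [occIdx] at h
      split at h
      · rcases List.mem_cons.1 h with h | h
        · omega
        · have := ih (s + 1) h; omega
  
      · have := ih (s + 1) h; omega

theorem mem_occIdx_nonneg (t : String) (s : Int) (l : List String) (m : Int)
    (hs : 0 ≤ s) (h : m ∈ occIdx t s l) : 0 ≤ m := by
  have := mem_occIdx_le t s l m h; omega

theorem pairWrite_cons (out : List String) (a b : Int) (r : List Int) :
    pairWrite out (a :: b :: r)
      = pairWrite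
          (PySem.List.pySetD (PySem.List.pySetD out a (PySem.Int.toStr b)) b (PySem.Int.toStr a))
          r := rfl

theorem pairWrite_short (out : List String) (l : List Int) (h : l.length ≤ 1) :
    pairWrite out l = out := by
  match l with
  | [] => rfl
  | [a] => rfl
  | a :: b :: r => simp at h

theorem foldl_pairWrite_id (L : List String) (g : String → List Int) (out : List String)
    (h : ∀ t ∈ L, (g t).length ≤ 1) :
    L.foldl (fun o t => pairWrite o (g t)) out = out := by
  induction L generalizing out with
  | nil => rfl
  | cons t L ih =>
      simp only [List.foldl_cons]
      rw [pairWrite_short out (g t) (h t (by simp))]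
      exact ih out (fun t' ht' => h t' (by simp [ht']))

theorem pySetD_comm (o : List String) (i j : Int) (v w : String)
    (hi : 0 ≤ i) (hj : 0 ≤ j) (hij : i ≠ j) :
    PySem.List.pySetD (PySem.List.pySetD o i v) j w
      = PySem.List.pySetD (PySem.List.pySetD o j w) i v := by
  have h1 : ∀ (xs : List String) (u : String),
      PySem.List.pySetD xs i u = xs.set i.toNat u :=
    fun xs u => PySem.List.pySetD_of_nonneg xs u hi
  have h2 : ∀ (xs : List String) (u : String),
      PySem.List.pySetD xs j u = xs.set j.toNat u :=
    fun xs u => PySem.List.pySetD_of_nonneg xs u hj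
  simp only [h1, h2]
  exact List.set_comm _ _ (by omega)

theorem pairWrite_pySetD_comm (l : List Int) (o : List String) (i : Int) (v : String)
    (hi : 0 ≤ i) (hl : ∀ m ∈ l, 0 ≤ m) (hmem : i ∉ l) :
    pairWrite (PySem.List.pySetD o i v) l = PySem.List.pySetD (pairWrite o l) i v := by
  match l with
  | [] => rfl
  | [a] => rfl
  | a :: b :: r =>
      have ha : 0 ≤ a := hl a (by simp)
      have hb : 0 ≤ b := hl b (by simp)
      have hia : i ≠ a := by intro h; exact hmem (by simp [h])
      have hib : i ≠ b := by intro h; exact hmem (by simp [h])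
      rw [pairWrite_cons, pairWrite_cons,
          pySetD_comm o i a v _ hi ha hia, pySetD_comm _ i b v _ hi hb hib]
      exact pairWrite_pySetD_comm r _ i v hi (fun m hm => hl m (by simp [hm]))
        (fun h => hmem (by simp [h]))

-- the double write of one pair (a, b) of token x commutes to the front of the numPool fold
theorem foldl_pairWrite_extract (L : List String) (g g' : String → List Int) (x : String)
    (a b : Int) (out : List String) (hx : x ∈ L) (hnd : L.Nodup)
    (ha : 0 ≤ a) (hb : 0 ≤ b)
    (hgx : g x = a :: b :: g' x)
    (hoth : ∀ t ∈ L, t ≠ x → g t = g' t)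
    (hnn : ∀ t ∈ L, t ≠ x → ∀ m ∈ g' t, 0 ≤ m)
    (hab : ∀ t ∈ L, t ≠ x → a ∉ g' t ∧ b ∉ g' t) :
    L.foldl (fun o t => pairWrite o (g t)) out
      = L.foldl (fun o t => pairWrite o (g' t))
          (PySem.List.pySetD (PySem.List.pySetD out a (PySem.Int.toStr b)) b
            (PySem.Int.toStr a)) := by
  induction L generalizing out with
  | nil => cases hx
  | cons t L ih =>
      simp only [List.foldl_cons]
      by_cases htx : t = x
      · subst htx
        have hnotin : t ∉ L := (List.nodup_cons.1 hnd).1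
        rw [hgx, pairWrite_cons]
        exact PySem.List.foldl_congr_mem _ _ _ _ (fun o t' ht' => by
          rw [hoth t' (List.mem_cons_of_mem _ ht') (by rintro rfl; exact hnotin ht')])
      · have hxL : x ∈ L := by
          rcases List.mem_cons.1 hx with h | h
          · exact absurd h.symm htx
          · exact h
        rw [hoth t (List.mem_cons_self) htx,
          ih _ hxL (List.nodup_cons.1 hnd).2
            (fun t' ht' hne => hoth t' (List.mem_cons_of_mem _ ht') hne)
            (fun t' ht' hne => hnn t' (List.mem_cons_of_mem _ ht') hne)
            (fun t' ht' hne => hab t' (List.mem_cons_of_mem _ ht') hne)]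
        congr 1
        have hga := (hab t List.mem_cons_self htx).1
        have hgb := (hab t List.mem_cons_self htx).2
        have hgnn : ∀ m ∈ g' t, 0 ≤ m := hnn t List.mem_cons_self htx
        rw [pairWrite_pySetD_comm (g' t) _ b _ hb hgnn hgb,
            pairWrite_pySetD_comm (g' t) _ a _ ha hgnn hga]

-- the initial pointers dict maps every key to none
theorem pointers_getD (t : String) :
    (numPool.foldl (fun d t => d.insert t none) PySem.Dict.empty
      : PySem.Dict String (Option Int)).getD t none = none := by
  have key : ∀ (L : List String) (d : PySem.Dict String (Option Int)),
      d.getD t none = none → (L.foldl (fun d t => d.insert t none) d).getD t none = none := by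
    intro L
    induction L with
    | nil => intro d h; simpa using h
    | cons u L ih =>
        intro d h
        refine ih _ ?_
        rw [PySem.Dict.getD_insert]
        split_ifs with hu
        · rfl
        · exact h
  exact key numPool PySem.Dict.empty (PySem.Dict.getD_empty _ _)

theorem numPool_nodup : numPool.Nodup := by decide

-- MAIN invariant lemma for A's fold
theorem mainA (l : List String) (s : Int) (d : PySem.Dict String (Option Int))
    (out : List String) (hs : 0 ≤ s)
    (hbd : ∀ t j, d.getD t none = some j → 0 ≤ j ∧ j < s)
    (hinj : ∀ t t' j, t ≠ t' → d.getD t none = some j → d.getD t' none ≠ some j) :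
    ((PySem.List.enumerate l s).foldl stepA (d, out)).2
      = numPool.foldl
          (fun o t => pairWrite o ((d.getD t none).toList ++ occIdx t s l)) out := by
  induction l generalizing s d out with
  | nil =>
      simp only [PySem.List.enumerate_nil, List.foldl_nil]
      rw [foldl_pairWrite_id]
      intro t _
      cases h : d.getD t none <;> simp [occIdx]
  | cons x r ih =>
      rw [PySem.List.enumerate_cons, List.foldl_cons]
      by_cases hxm : x ∈ numPool
      · have hx : numPool.contains x = true := by simpa using hxm
        cases hd : d.getD x none with
        | none =>
            have hstep : stepA (d, out) (s, x) = (d.insert x (some s), out) := by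
              simp only [stepA, hx, if_pos, hd]
            rw [hstep, ih (s + 1) _ out (by omega)
              (by
                intro t m h
                rw [PySem.Dict.getD_insert] at h
                split at h
                · cases h; omega
                · have := hbd t m h; omega)
              (by
                intro t t' m hne h h'
                rw [PySem.Dict.getD_insert] at h h'
                split at h <;> split at h'
                · simp_all
                · simp only [Option.some.injEq] at h
                  subst h
                  exact absurd (hbd t' s h').2 (by omega)
                · simp only [Option.some.injEq] at h'
                  subst h'
                  exact absurd (hbd t s h).2 (by omega)
                · exact hinj t t' m hne h h')]
            exact PySem.List.foldl_congr_mem _ _ _ _ (fun o t ht => by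
              by_cases htx : t = x
              · subst htx
                simp [hd, occIdx]
              · simp only [PySem.Dict.getD_insert, if_neg htx,
                    occIdx_ne t x s r (fun h => htx h.symm)])
        | some j =>
            have hjb := hbd x j hd
            have hstep : stepA (d, out) (s, x) =
                (d.insert x none,
                  PySem.List.pySetD (PySem.List.pySetD out j (PySem.Int.toStr s)) s
                    (PySem.Int.toStr j)) := by
              simp only [stepA, hx, if_pos, hd]
            rw [hstep, ih (s + 1) _ _ (by omega)
              (by
                intro t m h
                rw [PySem.Dict.getD_insert] at h
                split at h
                · cases h
                · have := hbd t m h; omega)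
              (by
                intro t t' m hne h h'
                rw [PySem.Dict.getD_insert] at h h'
                split at h
                · cases h
                · split at h'
                  · cases h'
                  · exact hinj t t' m hne h h')]
            refine (foldl_pairWrite_extract numPool
              (fun t => (d.getD t none).toList ++ occIdx t s (x :: r))
              (fun t => ((d.insert x none).getD t none).toList ++ occIdx t (s + 1) r)
              x j s out hxm numPool_nodup (by omega) hs
              (by
                simp [hd, occIdx])
              (by
                intro t _ htx
                simp only [PySem.Dict.getD_insert, if_neg htx,
                    occIdx_ne t x s r (fun h => htx h.symm)])
              (by
                intro t _ htx m hm
                simp only [PySem.Dict.getD_insert, if_neg htx] at hm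
                rcases List.mem_append.1 hm with hm | hm
                · cases h : d.getD t none with
                  | none => simp [h] at hm
                  | some m' =>
                      simp [h] at hm; subst hm; exact (hbd t m h).1
                · exact mem_occIdx_nonneg _ _ _ _ (by omega) hm)
              (by
                intro t _ htx
                simp only [PySem.Dict.getD_insert, if_neg htx]
                constructor
                · intro hm
                  rcases List.mem_append.1 hm with hm | hm
                  · cases h : d.getD t none with
                    | none => simp [h] at hm
                    | some m' =>
                        simp [h] at hm; subst hm
                        exact hinj x t j (fun e => htx e.symm) hd h
                  · have := mem_occIdx_le t (s + 1) r j hm; omega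
                · intro hm
                  rcases List.mem_append.1 hm with hm | hm
                  · cases h : d.getD t none with
                    | none => simp [h] at hm
                    | some m' =>
                        simp [h] at hm; subst hm
                        exact absurd (hbd t s h).2 (by omega)
                  · have := mem_occIdx_le t (s + 1) r s hm; omega)).symm
      · have hx : numPool.contains x = false := by simpa using hxm
        have hstep : stepA (d, out) (s, x) = (d, out) := by
          simp [stepA, hxm]
        rw [hstep, ih (s + 1) d out (by omega)
          (fun t m h => by have := hbd t m h; omega) hinj]
        exact PySem.List.foldl_congr_mem _ _ _ _ (fun o t ht => by
          simp only [occIdx_ne t x s r (by rintro rfl; exact hxm ht)])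

-- B's occurrence dict looks up to occIdx
theorem occ_map_getD (l : List String) (t : String) :
    ((PySem.List.enumerate l 0).foldl
        (fun (d : PySem.Dict String (List Int)) p => d.modify p.2 [] (· ++ [p.1]))
        PySem.Dict.empty).getD t []
      = occIdx t 0 l := by
  have key : ∀ (r : List String) (s : Int) (d : PySem.Dict String (List Int)),
      ((PySem.List.enumerate r s).foldl
          (fun (d : PySem.Dict String (List Int)) p => d.modify p.2 [] (· ++ [p.1])) d).getD t []
        = d.getD t [] ++ occIdx t s r := by
    intro r
    induction r with
    | nil => intro s d; simp [PySem.List.enumerate_nil, occIdx]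
    | cons x r ih =>
        intro s d
        rw [PySem.List.enumerate_cons, List.foldl_cons, ih]
        by_cases htx : x = t
        · subst htx
          rw [PySem.Dict.getD_modify_self]
          simp [occIdx]
        · rw [PySem.Dict.getD_modify_of_ne _ _ _ (fun h => htx h.symm),
              occIdx_ne t x s r htx]
  rw [key l 0 PySem.Dict.empty, PySem.Dict.getD_empty, List.nil_append]

theorem core_eq (smi : String) : ring_emb_n smi = ring_emb_n_alt smi := by
  unfold ring_emb_n ring_emb_n_alt
  rw [mainA (split_smi_1 smi) 0 _ _ (by omega)
    (by intro t j h; rw [pointers_getD] at h; cases h)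
    (by intro t t' j _ h; rw [pointers_getD] at h; cases h)]
  exact PySem.List.foldl_congr_mem _ _ _ _ (fun o t ht => by
    rw [pointers_getD, occ_map_getD]; rfl)

-- ===== VERDICT (by name: the statement is the Claim_ definition above) =====
theorem ring_emb_n_spec : Claim_equal_ring_emb_n := by
  intro smi _ _
  unfold Spec_ring_emb_n
  exact core_eq smi
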